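-- pv_equiv track=rewrite | github.com/pypi-data/pypi-mirror-402 | packages/runbooks/runbooks-1.3.0.tar.gz/runbooks-1.3.0/src/runbooks/cfat/assessment/collectors.py | _analyze_nat_optimization
-- ===== SOURCE A (Python) =====
-- from typing import Any, Dict, List, Optional
--
-- def _analyze_nat_optimization(nat_gateways: List[Dict], subnets: List[Dict]) -> int:
--     """
--     Analyze NAT Gateway placement for cost optimization opportunities.
--
--     Args:
--         nat_gateways: List of NAT Gateway configurations
--         subnets: List of subnet configurations
--
--     Returns:
--         Number of optimization opportunities found
--     """
--     opportunities = 0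
--
--     # Group NAT Gateways by Availability Zone
--     az_nat_count = {}
--     for nat in nat_gateways:
--         if nat.get("State") == "available":
--             subnet_id = nat.get("SubnetId")
--             # Find AZ for this subnet
--             subnet_az = None
--             for subnet in subnets:
--                 if subnet.get("SubnetId") == subnet_id:
--                     subnet_az = subnet.get("AvailabilityZone")
--                     break
--
--             if subnet_az:
--                 az_nat_count[subnet_az] = az_nat_count.get(subnet_az, 0) + 1
--
--     # Check for potential consolidation opportunities
--     for az, count in az_nat_count.items():
--         if count > 1:
--             opportunities += count - 1  # Could potentially consolidate to 1 per AZ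
--
--     return opportunities
-- ===== SOURCE B (Python) =====
-- def _analyze_nat_optimization(nat_gateways, subnets):
--     # First-occurrence map: SubnetId -> AvailabilityZone (whatever the first matching subnet has)
--     az_of = {}
--     for subnet in subnets:
--         sid = subnet.get("SubnetId")
--         if sid not in az_of:
--             az_of[sid] = subnet.get("AvailabilityZone")
--     total = 0
--     azs = set()
--     for nat in nat_gateways:
--         if nat.get("State") == "available":
--             az = az_of.get(nat.get("SubnetId"))
--             if az:
--                 total += 1
--                 azs.add(az)
--     # sum over AZs of (count-1) == total valid NATs minus number of distinct AZs
--     return total - len(azs)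
-- ===== Notes on version B (the rewrite author's own statement) =====
-- stated objective: alternative
-- what changed: Replaces the per-NAT linear scan over subnets and the per-AZ count dict + thresholded summation loop with a first-occurrence SubnetId->AZ map built once, a single pass counting valid NATs into a running total and a set of distinct AZs, and the closed form total - len(azs).
import Mathlib
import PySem

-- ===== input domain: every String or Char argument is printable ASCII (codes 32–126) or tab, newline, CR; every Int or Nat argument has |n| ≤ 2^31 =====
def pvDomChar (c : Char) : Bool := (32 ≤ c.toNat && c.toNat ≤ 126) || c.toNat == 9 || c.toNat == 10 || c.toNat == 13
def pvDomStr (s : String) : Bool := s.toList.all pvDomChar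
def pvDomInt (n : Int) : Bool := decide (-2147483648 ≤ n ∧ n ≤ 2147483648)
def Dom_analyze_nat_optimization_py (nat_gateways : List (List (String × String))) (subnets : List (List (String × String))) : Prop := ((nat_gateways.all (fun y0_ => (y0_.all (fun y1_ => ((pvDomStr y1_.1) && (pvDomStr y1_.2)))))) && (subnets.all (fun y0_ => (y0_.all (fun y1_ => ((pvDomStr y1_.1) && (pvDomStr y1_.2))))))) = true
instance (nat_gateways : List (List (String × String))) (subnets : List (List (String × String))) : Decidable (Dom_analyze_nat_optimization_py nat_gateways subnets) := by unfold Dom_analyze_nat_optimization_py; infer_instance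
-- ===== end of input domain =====

-- B builds a first-occurrence SubnetId→AZ map once, then in a single pass counts valid NATs and distinct AZs and returns total − distinct (replacing A's per-NAT subnet scan and per-AZ count dict).


-- ===== PORT A =====
-- d.get(key): first-match lookup in an association list (the inputs' dicts)
def pvGetKey : List (String × String) → String → Option String
  | [], _ => none
  | (k, v) :: rest, key => if k = key then some v else pvGetKey rest key

-- A's inner loop: scan subnets, take the AZ of the first one whose SubnetId equals subnet_id, break
def pvFindSubnetAZ : List (List (String × String)) → Option String → Option String
  | [], _ => none
  | s :: rest, sid =>
      if pvGetKey s "SubnetId" = sid then pvGetKey s "AvailabilityZone"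
      else pvFindSubnetAZ rest sid

def analyze_nat_optimization_py (nat_gateways : List (List (String × String))) (subnets : List (List (String × String))) : Int :=
  let az_nat_count : PySem.Dict String Int :=
    nat_gateways.foldl (fun d nat =>
      if pvGetKey nat "State" = some "available" then
        match pvFindSubnetAZ subnets (pvGetKey nat "SubnetId") with
        | some az => if az = "" then d else d.insert az (d.getD az 0 + 1)  -- 'if subnet_az:' — skip falsy "" / None
        | none => d
      else d) PySem.Dict.empty
  az_nat_count.items.foldl (fun opportunities p => if 1 < p.2 then opportunities + (p.2 - 1) else opportunities) 0

-- ===== PORT B =====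
-- first-occurrence map SubnetId → AvailabilityZone (value may itself be a missing AZ, hence Option values)
def pvAzMap (subnets : List (List (String × String))) : PySem.Dict (Option String) (Option String) :=
  subnets.foldl (fun d subnet =>
    if d.contains (pvGetKey subnet "SubnetId") then d
    else d.insert (pvGetKey subnet "SubnetId") (pvGetKey subnet "AvailabilityZone")) PySem.Dict.empty

def pvScanNats (subnets : List (List (String × String))) (nat_gateways : List (List (String × String))) : Int × PySem.Set String :=
  nat_gateways.foldl (fun (acc : Int × PySem.Set String) nat =>
    if pvGetKey nat "State" = some "available" then
      match ((pvAzMap subnets).get? (pvGetKey nat "SubnetId")).join with   -- az_of.get(...): none if key missing or stored AZ missing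
      | some az => if az = "" then acc else (acc.1 + 1, PySem.Set.add acc.2 az)
      | none => acc
    else acc) ((0 : Int), (PySem.Set.empty : PySem.Set String))

def analyze_nat_optimization_py_alt (nat_gateways : List (List (String × String))) (subnets : List (List (String × String))) : Int :=
  (pvScanNats subnets nat_gateways).1 - ((pvScanNats subnets nat_gateways).2.length : Int)

-- ===== PRECONDITION & SPEC =====
def Spec_analyze_nat_optimization_py (nat_gateways : List (List (String × String))) (subnets : List (List (String × String))) (out : Int) : Prop := out = analyze_nat_optimization_py_alt nat_gateways subnets
instance (nat_gateways : List (List (String × String))) (subnets : List (List (String × String))) (out : Int) : Decidable (Spec_analyze_nat_optimization_py nat_gateways subnets out) := by unfold Spec_analyze_nat_optimization_py; infer_instance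

-- ===== CLAIM (what is proved, stated in full; the proofs are below) =====
def Claim_equal_analyze_nat_optimization_py : Prop := ∀ (nat_gateways : List (List (String × String))) (subnets : List (List (String × String))), Dom_analyze_nat_optimization_py nat_gateways subnets → Spec_analyze_nat_optimization_py nat_gateways subnets (analyze_nat_optimization_py nat_gateways subnets)

-- ===== LEMMAS AND PROOFS =====

-- the AZ a NAT contributes (or none), read off A's structure
def pvAzOf (subnets : List (List (String × String))) (nat : List (String × String)) : Option String :=
  if pvGetKey nat "State" = some "available" then
    match pvFindSubnetAZ subnets (pvGetKey nat "SubnetId") with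
    | some az => if az = "" then none else some az
    | none => none
  else none

-- first-occurrence content of B's map, as a scan
def pvFirstAZ : List (List (String × String)) → Option String → Option (Option String)
  | [], _ => none
  | s :: rest, sid =>
      if pvGetKey s "SubnetId" = sid then some (pvGetKey s "AvailabilityZone")
      else pvFirstAZ rest sid

lemma pvAzMap_fold_get : ∀ (subnets : List (List (String × String))) (d : PySem.Dict (Option String) (Option String)) (sid : Option String),
    (subnets.foldl (fun d subnet =>
      if d.contains (pvGetKey subnet "SubnetId") then d
      else d.insert (pvGetKey subnet "SubnetId") (pvGetKey subnet "AvailabilityZone")) d).get? sid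
    = (d.get? sid).or (pvFirstAZ subnets sid)
  | [], d, sid => by simp [pvFirstAZ]
  | s :: rest, d, sid => by
    simp only [List.foldl_cons]
    rw [pvAzMap_fold_get rest _ sid]
    by_cases hc : d.contains (pvGetKey s "SubnetId") = true
    · rw [if_pos hc]
      by_cases he : pvGetKey s "SubnetId" = sid
      · have hs : (d.get? sid).isSome := by
          rw [← PySem.Dict.contains_eq_isSome_get?, ← he]; exact hc
        obtain ⟨v, hv⟩ := Option.isSome_iff_exists.mp hs
        simp [hv, Option.or]
      · simp [pvFirstAZ, he]
    · rw [if_neg hc]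
      by_cases he : pvGetKey s "SubnetId" = sid
      · have hnone : d.get? sid = none := by
          cases h : d.get? sid with
          | none => rfl
          | some v =>
            exact absurd (by rw [PySem.Dict.contains_eq_isSome_get?, he, h]; rfl) hc
        rw [PySem.Dict.get?_insert, hnone, if_pos he.symm]
        simp [pvFirstAZ, he, Option.or]
      · rw [PySem.Dict.get?_insert]
        have hne : ¬ sid = pvGetKey s "SubnetId" := fun h => he h.symm
        simp [hne, pvFirstAZ, he]

lemma pvFirstAZ_join : ∀ (subnets : List (List (String × String))) (sid : Option String),
    (pvFirstAZ subnets sid).join = pvFindSubnetAZ subnets sid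
  | [], _ => rfl
  | s :: rest, sid => by
    by_cases he : pvGetKey s "SubnetId" = sid
    · simp [pvFirstAZ, pvFindSubnetAZ, he]
    · simp [pvFirstAZ, pvFindSubnetAZ, he, pvFirstAZ_join rest sid]

lemma pvAzMap_get (subnets : List (List (String × String))) (sid : Option String) :
    ((pvAzMap subnets).get? sid).join = pvFindSubnetAZ subnets sid := by
  unfold pvAzMap
  rw [pvAzMap_fold_get]
  simp [Option.or, pvFirstAZ_join]

-- a loop that either skips an element or feeds one derived value to an accumulator is a fold over filterMap
lemma pvFoldl_filterMap {α β σ : Type} (f : α → Option β) (g : σ → β → σ) (step : σ → α → σ)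
    (h : ∀ s a, step s a = match f a with | some b => g s b | none => s) :
    ∀ (l : List α) (s : σ), l.foldl step s = (l.filterMap f).foldl g s
  | [], s => rfl
  | a :: l, s => by
    cases hf : f a with
    | none => simp [hf, h s a, pvFoldl_filterMap f g step h l]
    | some b => simp [hf, h s a, pvFoldl_filterMap f g step h l]

lemma pvPortA_eq (nat_gateways subnets : List (List (String × String))) :
    analyze_nat_optimization_py nat_gateways subnets
      = (PySem.Dict.counter (nat_gateways.filterMap (pvAzOf subnets))).items.foldl
          (fun opportunities p => if 1 < p.2 then opportunities + (p.2 - 1) else opportunities) 0 := by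
  unfold analyze_nat_optimization_py
  rw [pvFoldl_filterMap (pvAzOf subnets) (fun d az => d.insert az (d.getD az 0 + 1))
      _ (fun d nat => by
        unfold pvAzOf
        by_cases hs : pvGetKey nat "State" = some "available"
        · simp only [hs, if_true]
          cases pvFindSubnetAZ subnets (pvGetKey nat "SubnetId") with
          | none => rfl
          | some az => by_cases hz : az = "" <;> simp [hz]
        · simp [hs])]
  rw [PySem.Dict.foldl_insert_getD_add_one_eq_counter]

lemma pvPairFold : ∀ (l : List String) (t : Int) (s : PySem.Set String),
    l.foldl (fun acc az => (acc.1 + 1, PySem.Set.add acc.2 az)) (t, s)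
      = (t + l.length, l.foldl PySem.Set.add s)
  | [], t, s => by simp
  | a :: l, t, s => by
    simp only [List.foldl_cons, List.length_cons]
    rw [pvPairFold l (t + 1) (PySem.Set.add s a)]
    congr 1
    push_cast
    ring

lemma pvPortB_eq (nat_gateways subnets : List (List (String × String))) :
    analyze_nat_optimization_py_alt nat_gateways subnets
      = ((nat_gateways.filterMap (pvAzOf subnets)).length : Int)
        - ((PySem.Set.ofList (nat_gateways.filterMap (pvAzOf subnets))).length : Int) := by
  unfold analyze_nat_optimization_py_alt pvScanNats
  rw [pvFoldl_filterMap (pvAzOf subnets) (fun acc az => (acc.1 + 1, PySem.Set.add acc.2 az))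
      _ (fun acc nat => by
        unfold pvAzOf
        rw [pvAzMap_get]
        by_cases hs : pvGetKey nat "State" = some "available"
        · simp only [hs, if_true]
          cases pvFindSubnetAZ subnets (pvGetKey nat "SubnetId") with
          | none => rfl
          | some az => by_cases hz : az = "" <;> simp [hz]
        · simp [hs])]
  rw [pvPairFold]
  have hof : List.foldl PySem.Set.add PySem.Set.empty (nat_gateways.filterMap (pvAzOf subnets))
      = PySem.Set.ofList (nat_gateways.filterMap (pvAzOf subnets)) := rfl
  rw [hof]
  simp

lemma pvSumFold : ∀ (ps : List (String × Int)) (a : Int), (∀ p ∈ ps, 1 ≤ p.2) →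
    ps.foldl (fun acc p => if 1 < p.2 then acc + (p.2 - 1) else acc) a
      = a + (ps.map Prod.snd).sum - ps.length
  | [], a, _ => by simp
  | p :: ps, a, h => by
    simp only [List.foldl_cons]
    rw [pvSumFold ps _ (fun q hq => h q (List.mem_cons_of_mem p hq))]
    have h1 : 1 ≤ p.2 := h p (by simp)
    simp only [List.map_cons, List.sum_cons, List.length_cons]
    split_ifs with hp <;> push_cast <;> omega

lemma pvSet_perm_dedup (l : List String) : (PySem.Set.ofList l).Perm l.dedup := by
  refine (List.perm_ext_iff_of_nodup (PySem.Set.nodup_ofList l) l.nodup_dedup).mpr ?_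
  intro a
  rw [PySem.Set.mem_ofList, List.mem_dedup]

-- ===== VERDICT (by name: the statement is the Claim_ definition above) =====
theorem analyze_nat_optimization_py_spec : Claim_equal_analyze_nat_optimization_py := by
  intro nat_gateways subnets _
  unfold Spec_analyze_nat_optimization_py
  rw [pvPortA_eq, pvPortB_eq]
  set l := nat_gateways.filterMap (pvAzOf subnets) with hl
  rw [PySem.Dict.items_counter]
  have hpos : ∀ p ∈ (PySem.Set.ofList l).map (fun k => (k, (l.count k : Int))), 1 ≤ p.2 := by
    intro p hp
    obtain ⟨k, hk, rfl⟩ := List.mem_map.mp hp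
    simp only [PySem.Set.mem_ofList] at hk
    have := List.count_pos_iff.mpr hk
    simp
    omega
  rw [pvSumFold _ _ hpos]
  have hperm : (PySem.Set.ofList l).Perm l.dedup := pvSet_perm_dedup l
  have hsum : ((PySem.Set.ofList l).map (fun k => (l.count k : Int))).sum = (l.length : Int) := by
    rw [(hperm.map (fun k => (l.count k : Int))).sum_eq]
    have h2 : (l.dedup.map (fun k => (l.count k : Int)))
        = ((l.dedup.map fun x => l.count x).map (fun n : Nat => (n : Int))) := by
      simp [List.map_map, Function.comp_def]
    rw [h2, ← Nat.cast_list_sum, List.sum_map_count_dedup_eq_length]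
  have hcomp : ((PySem.Set.ofList l).map (fun k => (k, (l.count k : Int)))).map Prod.snd
      = (PySem.Set.ofList l).map (fun k => (l.count k : Int)) := by
    simp [List.map_map, Function.comp_def]
  rw [hcomp, hsum]
  simp only [List.length_map]
  omega
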